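-- pv_equiv track=rewrite | github.com/flikhamud45/liri | unit 3/3.4.py | check_char_un
-- ===== SOURCE A (Python) =====
-- def check_char_un(username: str):
--     flag_ = False
--     numflag= False
--     letterflag = False
--     isok = True
--     illegal = []
--
--     for char in username:
--         if char == "_":
--             flag_ = True
--         elif char.isdigit():
--             numflag = True
--         elif char.isalpha():
--             letterflag = True
--         else:
--             illegal.append(char)
--
--     if not (flag_ and numflag and letterflag) or len(illegal) >0:
--         isok = False
--     return (illegal, isok)
-- ===== SOURCE B (Python) =====
-- def check_char_un(username: str):
--     illegal = [c for c in username
--                if c != "_" and not c.isdigit() and not c.isalpha()]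
--     isok = ("_" in username
--             and any(c.isdigit() for c in username)
--             and any(c.isalpha() for c in username)
--             and not illegal)
--     return (illegal, isok)
-- ===== Notes on version B (the rewrite author's own statement) =====
-- stated objective: simpler
-- what changed: Replaces the single fused loop maintaining three flags and an accumulator with independent single-purpose scans: a comprehension collecting illegal chars plus membership/any() checks combined into one boolean expression.
import Mathlib
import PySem

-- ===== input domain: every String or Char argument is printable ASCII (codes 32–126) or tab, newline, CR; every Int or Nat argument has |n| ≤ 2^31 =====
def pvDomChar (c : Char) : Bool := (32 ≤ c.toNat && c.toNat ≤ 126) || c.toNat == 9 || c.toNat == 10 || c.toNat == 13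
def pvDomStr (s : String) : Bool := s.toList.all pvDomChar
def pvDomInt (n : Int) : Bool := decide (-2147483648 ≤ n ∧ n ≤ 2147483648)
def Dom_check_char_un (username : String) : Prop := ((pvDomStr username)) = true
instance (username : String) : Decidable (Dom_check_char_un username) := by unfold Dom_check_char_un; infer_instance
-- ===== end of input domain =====

-- B replaces A's single fused loop (three flags + accumulator) by independent
-- single-purpose scans combined at the end: a simpler decomposition, same cost.

-- ===== PORT A =====
-- A's loop body: update the three flags / append to illegal, in A's branch order.
def pvStepA (st : Bool × Bool × Bool × List String) (c : Char) : Bool × Bool × Bool × List String :=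
  if c == '_' then (true, st.2.1, st.2.2.1, st.2.2.2)
  else if PySem.Chars.isdigit c then (st.1, true, st.2.2.1, st.2.2.2)
  else if PySem.Chars.isalpha c then (st.1, st.2.1, true, st.2.2.2)
  else (st.1, st.2.1, st.2.2.1, st.2.2.2 ++ [String.ofList [c]])

def check_char_un (username : String) : List String × Bool :=
  let st := username.toList.foldl pvStepA (false, false, false, [])
  let isok := if (!(st.1 && st.2.1 && st.2.2.1)) = true ∨ 0 < st.2.2.2.length then false else true
  (st.2.2.2, isok)

-- ===== PORT B =====
def check_char_un_alt (username : String) : List String × Bool :=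
  let cs := username.toList
  let illegal := (cs.filter (fun c => !(c == '_') && !PySem.Chars.isdigit c && !PySem.Chars.isalpha c)).map
      (fun c => String.ofList [c])
  let isok := PySem.Chars.isIn ['_'] cs && cs.any PySem.Chars.isdigit
      && cs.any PySem.Chars.isalpha && illegal.isEmpty
  (illegal, isok)

-- ===== PRECONDITION & SPEC =====
def Spec_check_char_un (username : String) (out : List String × Bool) : Prop := out = check_char_un_alt username
instance (username : String) (out : List String × Bool) : Decidable (Spec_check_char_un username out) := by unfold Spec_check_char_un; infer_instance

-- ===== CLAIM (what is proved, stated in full; the proofs are below) =====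
def Claim_equal_check_char_un : Prop := ∀ (username : String), Dom_check_char_un username → Spec_check_char_un username (check_char_un username)

-- ===== LEMMAS AND PROOFS =====

lemma alpha_not_digit (c : Char) (h : PySem.Chars.isdigit c = true) : PySem.Chars.isalpha c = false := by
  have e1 : ('0' : Char).val.toNat = 48 := rfl
  have e2 : ('9' : Char).val.toNat = 57 := rfl
  have e3 : ('A' : Char).val.toNat = 65 := rfl
  have e4 : ('Z' : Char).val.toNat = 90 := rfl
  have e5 : ('a' : Char).val.toNat = 97 := rfl
  have e6 : ('z' : Char).val.toNat = 122 := rfl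
  simp only [PySem.Chars.isdigit, PySem.Chars.isalpha, PySem.Chars.isupper, PySem.Chars.islower,
    Char.le_def, UInt32.le_iff_toNat_le, Bool.and_eq_true, decide_eq_true_eq,
    Bool.or_eq_false_iff, Bool.and_eq_false_iff, decide_eq_false_iff_not, not_le,
    e1, e2, e3, e4, e5, e6] at *
  omega

lemma fold_inv (cs : List Char) (f n l : Bool) (acc : List String) :
    cs.foldl pvStepA (f, n, l, acc) =
      (f || cs.any (· == '_'), n || cs.any PySem.Chars.isdigit, l || cs.any PySem.Chars.isalpha,
       acc ++ (cs.filter (fun c => !(c == '_') && !PySem.Chars.isdigit c && !PySem.Chars.isalpha c)).map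
         (fun c => String.ofList [c])) := by
  induction cs generalizing f n l acc with
  | nil => simp
  | cons c cs ih =>
    simp only [List.foldl_cons, pvStepA, List.any_cons, List.filter_cons]
    by_cases h1 : c = '_'
    · subst h1
      have d1 : PySem.Chars.isdigit '_' = false := by decide
      have d2 : PySem.Chars.isalpha '_' = false := by decide
      simp [ih, d1, d2]
    · have hb : (c == '_') = false := beq_eq_false_iff_ne.mpr h1
      simp only [beq_iff_eq, if_neg h1]
      by_cases h2 : PySem.Chars.isdigit c = true
      · simp [h2, ih, alpha_not_digit c h2, hb]
      · simp only [Bool.not_eq_true] at h2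
        by_cases h3 : PySem.Chars.isalpha c = true
        · simp [h2, h3, ih, hb]
        · simp only [Bool.not_eq_true] at h3
          simp [hb, h2, h3, ih, List.append_assoc]

lemma singleton_infix {a : Char} {l : List Char} : [a] <:+: l ↔ a ∈ l := by
  constructor
  · intro h; exact h.subset (by simp)
  · intro h; obtain ⟨s, t, rfl⟩ := List.append_of_mem h; exact ⟨s, t, by simp⟩

lemma isIn_underscore (cs : List Char) : PySem.Chars.isIn ['_'] cs = cs.any (· == '_') := by
  by_cases h : '_' ∈ cs
  · rw [(PySem.Chars.isIn_iff_infix _ _).mpr (singleton_infix.mpr h)]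
    exact (List.any_eq_true.mpr ⟨'_', h, by simp⟩).symm
  · rw [(PySem.Chars.isIn_eq_false_iff _ _).mpr (fun hinf => h (singleton_infix.mp hinf))]
    refine (List.any_eq_false.mpr ?_).symm
    intro x hx
    simp only [beq_iff_eq]
    exact fun he => h (he ▸ hx)

-- ===== VERDICT (by name: the statement is the Claim_ definition above) =====
theorem check_char_un_spec : Claim_equal_check_char_un := by
  intro u _
  unfold Spec_check_char_un check_char_un check_char_un_alt
  simp only [fold_inv, Bool.false_or, List.nil_append, isIn_underscore, Prod.mk.injEq]
  refine ⟨trivial, ?_⟩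
  generalize (List.filter _ u.toList).map (fun c => String.ofList [c]) = L
  cases u.toList.any (· == '_') <;> cases u.toList.any PySem.Chars.isdigit <;>
    cases u.toList.any PySem.Chars.isalpha <;> cases L <;>
      simp
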